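-- pv_equiv track=rewrite | github.com/notwopr/SampleCodeLatest | newbacktest/ingredients_funclib/STRATTEST_FUNCBASE_RAW.py | getallseglens
-- ===== SOURCE A (Python) =====
-- import operator
--
-- def getallseglens(seriesdata, seglenmode):
--     '''gives an array of lengths of segments in a time-series.  if mode e.g. is positive, it will give you the segment lengths of consecutive positive daily pct-changes over the entire series. if the mode is flat, it will return the lengths of all flat segments in the time-series.'''
--     allseglens = []
--     single_seg = 0
--     # FOR EACH CHANGE...
--     # count = 0
--     for sample in seriesdata:
--         # IF SAMPLE IS POS/NEG/FLAT, ADD TO TALLY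
--         if seglenmode == 'positive':
--             condstat = operator.gt(sample, 0)
--         elif seglenmode == 'negative':
--             condstat = operator.lt(sample, 0)
--         elif seglenmode == 'flat':
--             condstat = operator.eq(sample, 0)
--         if condstat is True:
--             single_seg += 1
--         # IF SAMPLE IS NOT POS/NEG/FLAT,
--         else:
--             # CLOSE TALLY AND SAVE
--             if single_seg > 0:
--                 allseglens.append(single_seg)
--             # RESET TALLY TO ZERO
--             single_seg = 0
--         # count += 1
--     # IF REACH END OF ALL SAMPLES, RECORD LAST TALLY IF ANY
--     if single_seg > 0:
--         allseglens.append(single_seg)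
--     # IF NO POS/NEG/FLAT SEGS FOUND, RETURN LIST WITH VALUE OF ZERO
--     return [0] if len(allseglens) == 0 else allseglens
-- ===== SOURCE B (Python) =====
-- import operator
--
-- def getallseglens(seriesdata, seglenmode):
--     # Pass 1: per-sample boolean flags (branch kept inside the loop so an
--     # invalid mode still raises NameError only on a non-empty series).
--     flags = []
--     for sample in seriesdata:
--         if seglenmode == 'positive':
--             condstat = operator.gt(sample, 0)
--         elif seglenmode == 'negative':
--             condstat = operator.lt(sample, 0)
--         elif seglenmode == 'flat':
--             condstat = operator.eq(sample, 0)
--         flags.append(condstat is True)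
--     # Pass 2: two-pointer grouping of equal flags; keep lengths of True groups.
--     lens = []
--     i = 0
--     n = len(flags)
--     while i < n:
--         j = i
--         while j < n and flags[j] == flags[i]:
--             j += 1
--         if flags[i]:
--             lens.append(j - i)
--         i = j
--     return [0] if len(lens) == 0 else lens
-- ===== Notes on version B (the rewrite author's own statement) =====
-- stated objective: alternative
-- what changed: B splits the work into two passes: it first materialises the per-sample boolean flags, then finds run boundaries with a two-pointer scan over the flags and keeps the lengths of the True groups, instead of A's single pass with a running tally and flush-on-close accumulator.
import Mathlib
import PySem

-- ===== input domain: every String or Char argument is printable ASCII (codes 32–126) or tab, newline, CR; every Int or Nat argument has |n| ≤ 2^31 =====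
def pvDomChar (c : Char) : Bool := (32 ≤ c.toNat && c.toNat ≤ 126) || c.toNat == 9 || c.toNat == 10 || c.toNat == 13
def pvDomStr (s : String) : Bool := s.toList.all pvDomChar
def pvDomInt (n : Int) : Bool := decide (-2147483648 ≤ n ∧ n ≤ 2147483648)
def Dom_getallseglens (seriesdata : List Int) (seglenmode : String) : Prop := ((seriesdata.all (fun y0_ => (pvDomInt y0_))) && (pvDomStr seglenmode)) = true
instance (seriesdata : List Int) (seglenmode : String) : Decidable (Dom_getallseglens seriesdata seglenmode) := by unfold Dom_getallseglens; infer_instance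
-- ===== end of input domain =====

-- B replaces A's single running-tally pass by two passes (flags list, then a two-pointer
-- grouping scan); objective: alternative decomposition, same O(n) cost.
-- ===== PORT A =====
-- The final `else false` stands for Python's NameError on an unknown mode (condstat unbound);
-- Pre_ excludes exactly the inputs that reach it.
def getallseglens (seriesdata : List Int) (seglenmode : String) : List Int :=
  let res := seriesdata.foldl (fun (st : List Int × Int) sample =>
    let condstat : Bool :=
      if seglenmode == "positive" then decide (sample > 0)
      else if seglenmode == "negative" then decide (sample < 0)
      else if seglenmode == "flat" then decide (sample = 0)
      else false
    if condstat then (st.1, st.2 + 1)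
    else (if st.2 > 0 then st.1 ++ [st.2] else st.1, 0)) ([], 0)
  let allseglens := if res.2 > 0 then res.1 ++ [res.2] else res.1
  if allseglens.length = 0 then [0] else allseglens

-- ===== PORT B =====
-- per-sample flag of pass 1 (same branch order as Source B's loop body; final `else false`
-- again stands for the NameError case excluded by Pre_)
def pyflag (seglenmode : String) (sample : Int) : Bool :=
  if seglenmode == "positive" then decide (sample > 0)
  else if seglenmode == "negative" then decide (sample < 0)
  else if seglenmode == "flat" then decide (sample = 0)
  else false

-- pass 2 of Source B: the inner `while j < n and flags[j] == flags[i]` is the takeWhile/dropWhile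
-- split of the remaining list; a True group contributes its length.
def runsTrue : List Bool → List Int
  | [] => []
  | b :: rest =>
    let same := rest.takeWhile (fun x => x == b)
    let rest' := rest.dropWhile (fun x => x == b)
    if b then ((1 + (same.length : Int)) :: runsTrue rest') else runsTrue rest'
termination_by l => l.length
decreasing_by
  all_goals exact Nat.lt_of_le_of_lt (List.length_dropWhile_le (fun x => x == b) rest) (by simp)

def getallseglens_alt (seriesdata : List Int) (seglenmode : String) : List Int :=
  let flags := seriesdata.map (pyflag seglenmode)
  let lens := runsTrue flags
  if lens.length = 0 then [0] else lens

-- ===== PRECONDITION & SPEC =====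
-- Pre_ excludes exactly the inputs where the Python A raises NameError (unknown mode with a
-- non-empty series, so condstat is unbound at `condstat is True`); A returns on everything else.
def Pre_getallseglens (seriesdata : List Int) (seglenmode : String) : Prop :=
  seglenmode = "positive" ∨ seglenmode = "negative" ∨ seglenmode = "flat" ∨ seriesdata = []
instance (seriesdata : List Int) (seglenmode : String) : Decidable (Pre_getallseglens seriesdata seglenmode) := by unfold Pre_getallseglens; infer_instance
def pvWitness_getallseglens : List Int × String := ([1, 2, -1, 0, 3], "positive")
def Spec_getallseglens (seriesdata : List Int) (seglenmode : String) (out : List Int) : Prop := out = getallseglens_alt seriesdata seglenmode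
instance (seriesdata : List Int) (seglenmode : String) (out : List Int) : Decidable (Spec_getallseglens seriesdata seglenmode out) := by unfold Spec_getallseglens; infer_instance

-- ===== CLAIM (what is proved, stated in full; the proofs are below) =====
def Claim_equal_getallseglens : Prop := ∀ (seriesdata : List Int) (seglenmode : String), Dom_getallseglens seriesdata seglenmode → Pre_getallseglens seriesdata seglenmode → Spec_getallseglens seriesdata seglenmode (getallseglens seriesdata seglenmode)

-- ===== LEMMAS AND PROOFS =====

-- A's loop, flags-first view: process the flag list with the running tally s,
-- flushing on False and at the end.
def loopA : List Bool → Int → List Int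
  | [], s => if s > 0 then [s] else []
  | f :: fs, s =>
    if f then loopA fs (s + 1)
    else (if s > 0 then [s] else []) ++ loopA fs 0

-- name for the body of A's fold (definitionally equal to the lambda in the port)
def stepA (m : String) : List Int × Int → Int → List Int × Int := fun st sample =>
  let condstat : Bool :=
    if m == "positive" then decide (sample > 0)
    else if m == "negative" then decide (sample < 0)
    else if m == "flat" then decide (sample = 0)
    else false
  if condstat then (st.1, st.2 + 1)
  else (if st.2 > 0 then st.1 ++ [st.2] else st.1, 0)

theorem stepA_flag (m : String) (st : List Int × Int) (x : Int) :
    stepA m st x =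
      if pyflag m x then (st.1, st.2 + 1)
      else (if st.2 > 0 then st.1 ++ [st.2] else st.1, 0) := rfl

theorem unfoldA (sd : List Int) (m : String) :
    getallseglens sd m =
      (if (if (sd.foldl (stepA m) ([], 0)).2 > 0
            then (sd.foldl (stepA m) ([], 0)).1 ++ [(sd.foldl (stepA m) ([], 0)).2]
            else (sd.foldl (stepA m) ([], 0)).1).length = 0
        then [0]
        else (if (sd.foldl (stepA m) ([], 0)).2 > 0
            then (sd.foldl (stepA m) ([], 0)).1 ++ [(sd.foldl (stepA m) ([], 0)).2]
            else (sd.foldl (stepA m) ([], 0)).1)) := rfl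

theorem unfoldB (sd : List Int) (m : String) :
    getallseglens_alt sd m =
      (if (runsTrue (sd.map (pyflag m))).length = 0 then [0]
        else runsTrue (sd.map (pyflag m))) := rfl

-- dropping a leading False-run does not change runsTrue
theorem runsTrue_dropFalse_aux (g : List Bool) :
    runsTrue (g.dropWhile (fun x => !x)) = runsTrue g := by
  match g with
  | [] => rfl
  | true :: r => simp
  | false :: r =>
    conv_rhs => rw [runsTrue]
    simp

theorem runsTrue_cons_false (g : List Bool) : runsTrue (false :: g) = runsTrue g := by
  rw [runsTrue]
  simp [runsTrue_dropFalse_aux]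

-- runsTrue expressed via the leading True-run of the whole list
theorem runsTrue_eq_lead (gs : List Bool) :
    runsTrue gs =
      (if ((gs.takeWhile (fun x => x == true)).length : Int) > 0
        then [((gs.takeWhile (fun x => x == true)).length : Int)] else [])
        ++ runsTrue (gs.dropWhile (fun x => x == true)) := by
  match gs with
  | [] => simp [runsTrue]
  | true :: rest =>
    rw [runsTrue]
    simp
    omega
  | false :: rest =>
    simp

-- core correspondence: loopA with tally s equals the leading-run formula
theorem loopA_eq (fs : List Bool) (s : Int) :
    loopA fs s =
      (if s + ((fs.takeWhile (fun x => x == true)).length : Int) > 0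
        then [s + ((fs.takeWhile (fun x => x == true)).length : Int)] else [])
        ++ runsTrue (fs.dropWhile (fun x => x == true)) := by
  induction fs generalizing s with
  | nil => simp [loopA, runsTrue]
  | cons f fs ih =>
    cases f with
    | true =>
      rw [loopA, ih (s + 1)]
      simp only [List.takeWhile_cons, List.dropWhile_cons, beq_self_eq_true, if_true,
        List.length_cons, Nat.cast_add, Nat.cast_one]
      rw [show s + 1 + ((fs.takeWhile (fun x => x == true)).length : Int)
            = s + (((fs.takeWhile (fun x => x == true)).length : Int) + 1) from by ring]
    | false =>
      rw [loopA]
      simp only [Bool.false_eq_true, if_false, ih 0, List.takeWhile_cons, List.dropWhile_cons]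
      simp only [zero_add]
      rw [← runsTrue_eq_lead fs]
      simp [runsTrue_cons_false]

theorem loopA_zero (fs : List Bool) : loopA fs 0 = runsTrue fs := by
  rw [loopA_eq]
  simp only [zero_add]
  rw [← runsTrue_eq_lead]

-- A's fold with invariant state equals acc ++ loopA over the flags
theorem foldA_eq (m : String) (xs : List Int) (acc : List Int) (s : Int) :
    (if (xs.foldl (stepA m) (acc, s)).2 > 0
      then (xs.foldl (stepA m) (acc, s)).1 ++ [(xs.foldl (stepA m) (acc, s)).2]
      else (xs.foldl (stepA m) (acc, s)).1)
      = acc ++ loopA (xs.map (pyflag m)) s := by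
  induction xs generalizing acc s with
  | nil =>
    simp only [List.foldl_nil, List.map_nil, loopA]
    split_ifs <;> simp
  | cons x xs ih =>
    rw [List.foldl_cons, stepA_flag, List.map_cons]
    cases hf : pyflag m x with
    | true =>
      simp only [if_true]
      rw [show loopA (true :: xs.map (pyflag m)) s = loopA (xs.map (pyflag m)) (s + 1) from by
        rw [loopA]; simp]
      exact ih acc (s + 1)
    | false =>
      simp only [Bool.false_eq_true, if_false]
      rw [show loopA (false :: xs.map (pyflag m)) s
            = (if s > 0 then [s] else []) ++ loopA (xs.map (pyflag m)) 0 from by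
        rw [loopA]; simp]
      by_cases hs : s > 0
      · rw [if_pos hs, if_pos hs, ih (acc ++ [s]) 0, List.append_assoc]
      · rw [if_neg hs, if_neg hs, ih acc 0]
        simp

-- ===== VERDICT (by name: the statement is the Claim_ definition above) =====
theorem getallseglens_spec : Claim_equal_getallseglens := by
  intro seriesdata seglenmode _ _
  show getallseglens seriesdata seglenmode = getallseglens_alt seriesdata seglenmode
  rw [unfoldA, unfoldB, foldA_eq, loopA_zero]
  simp
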